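-- pv_equiv track=rewrite | github.com/JoinMarket-Org/joinmarket-clientserver | jmclient/jmclient/support.py | select_gradual
-- ===== SOURCE A (Python) =====
-- from functools import reduce
--
-- class NotEnoughFundsException(RuntimeError):
--
--     def __init__(self, want, has):
--         super().__init__("Not enough funds, " +
--             str(want) + " vs. " + str(has) + ".")
--
-- def select_gradual(unspent, value):
--     """
--     UTXO selection algorithm for gradual dust reduction
--     If possible, combines outputs, picking as few as possible of the largest
--     utxos less than the target value; if the target value is larger than the
--     sum of all smaller utxos, uses the smallest utxo larger than the value.
--     """
--     value, key = int(value), lambda u: u["value"]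
--     high = sorted([u for u in unspent if key(u) >= value], key=key)
--     low = sorted([u for u in unspent if key(u) < value], key=key)
--     lowsum = reduce(lambda x, y: x + y, map(key, low), 0)
--     if value > lowsum:
--         if len(high) == 0:
--             raise NotEnoughFundsException(value, lowsum)
--         else:
--             return [high[0]]
--     else:
--         start, end, total = 0, 0, 0
--         while total < value:
--             total += low[end]['value']
--             end += 1
--         while total >= value + low[start]['value']:
--             total -= low[start]['value']
--             start += 1
--         return low[start:end]
-- ===== SOURCE B (Python) =====
-- from functools import reduce
--
-- class NotEnoughFundsException(RuntimeError):
--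
--     def __init__(self, want, has):
--         super().__init__("Not enough funds, " +
--             str(want) + " vs. " + str(has) + ".")
--
-- def select_gradual(unspent, value):
--     """Same selection via a prefix-sum table over the sorted small utxos:
--     the window [start:end] is located by two first-hit searches in the table
--     instead of advancing two running-total pointers."""
--     value, key = int(value), lambda u: u["value"]
--     high = sorted([u for u in unspent if key(u) >= value], key=key)
--     low = sorted([u for u in unspent if key(u) < value], key=key)
--     prefix = [0]
--     for u in low:
--         prefix.append(prefix[-1] + key(u))
--     lowsum = prefix[-1]
--     if value > lowsum:
--         if len(high) == 0:
--             raise NotEnoughFundsException(value, lowsum)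
--         else:
--             return [high[0]]
--     end = next(i for i in range(len(prefix)) if prefix[i] >= value)
--     target = prefix[end] - value
--     start = next(s for s in range(1, end + 1) if prefix[s] > target) - 1
--     return low[start:end]
-- ===== Notes on version B (the rewrite author's own statement) =====
-- stated objective: alternative
-- what changed: The low-utxo window is found by building a prefix-sum table over the sorted small utxos and locating both window boundaries by first-hit searches in that table, instead of advancing two running-total pointers with mutually dependent while loops.
import Mathlib
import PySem

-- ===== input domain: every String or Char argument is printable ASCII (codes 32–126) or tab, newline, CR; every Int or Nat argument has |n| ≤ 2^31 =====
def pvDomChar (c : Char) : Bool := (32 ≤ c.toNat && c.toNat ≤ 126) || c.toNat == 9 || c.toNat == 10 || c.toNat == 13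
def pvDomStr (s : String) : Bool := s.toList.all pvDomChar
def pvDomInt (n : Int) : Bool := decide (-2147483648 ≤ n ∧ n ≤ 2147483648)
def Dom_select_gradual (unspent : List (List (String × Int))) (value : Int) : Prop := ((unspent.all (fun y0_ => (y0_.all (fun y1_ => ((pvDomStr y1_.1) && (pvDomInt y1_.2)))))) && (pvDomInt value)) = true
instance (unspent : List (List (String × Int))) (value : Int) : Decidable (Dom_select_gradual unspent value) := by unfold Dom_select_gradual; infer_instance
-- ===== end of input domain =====

-- B replaces A's two mutually-advancing running-total pointers by a prefix-sum table over the
-- sorted small utxos and locates the window [start:end] by two first-hit searches in that table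
-- (objective: alternative decomposition of the same O(n log n) selection; same return value).

-- ===== PORT A =====
-- u["value"] : dict lookup (first match); missing key = KeyError, excluded by Pre_
def sgKey (u : List (String × Int)) : Int := (List.lookup "value" u).getD 0

-- 'while total < value: total += low[end]["value"]; end += 1'; on exhausted list Python
-- raises IndexError (excluded by Pre_)
def sgLoop1 (value : Int) : List (List (String × Int)) → Int → Nat → Nat × Int
  | [], total, e => (e, total)
  | u :: rs, total, e =>
      if total < value then sgLoop1 value rs (total + sgKey u) (e + 1) else (e, total)

-- 'while total >= value + low[start]["value"]: total -= low[start]["value"]; start += 1';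
-- on exhausted list Python raises IndexError (excluded by Pre_)
def sgLoop2 (value : Int) : List (List (String × Int)) → Int → Nat → Nat × Int
  | [], total, s => (s, total)
  | u :: rs, total, s =>
      if value + sgKey u ≤ total then sgLoop2 value rs (total - sgKey u) (s + 1) else (s, total)

def select_gradual (unspent : List (List (String × Int))) (value : Int) : List (List (String × Int)) :=
  let high := PySem.List.sorted (unspent.filter (fun u => decide (value ≤ sgKey u))) sgKey
  let low := PySem.List.sorted (unspent.filter (fun u => decide (sgKey u < value))) sgKey
  let lowsum := (low.map sgKey).foldl (fun x y => x + y) 0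
  if lowsum < value then
    match high with
    | [] => []          -- raise NotEnoughFundsException; excluded by Pre_
    | h :: _ => [h]
  else
    let p1 := sgLoop1 value low 0 0
    let p2 := sgLoop2 value low p1.2 0
    PySem.List.slice low (some (p2.1 : Int)) (some (p1.1 : Int))

-- ===== PORT B =====
def select_gradual_alt (unspent : List (List (String × Int))) (value : Int) : List (List (String × Int)) :=
  let high := PySem.List.sorted (unspent.filter (fun u => decide (value ≤ sgKey u))) sgKey
  let low := PySem.List.sorted (unspent.filter (fun u => decide (sgKey u < value))) sgKey
  -- prefix = [0]; for u in low: prefix.append(prefix[-1] + key(u))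
  let pfx := low.foldl (fun acc u => acc ++ [PySem.List.pyGetD acc (-1) 0 + sgKey u]) [(0 : Int)]
  let lowsum := PySem.List.pyGetD pfx (-1) 0
  if lowsum < value then
    match high with
    | [] => []          -- raise NotEnoughFundsException; excluded by Pre_
    | h :: _ => [h]
  else
    -- end = next(i for i in range(len(prefix)) if prefix[i] >= value)
    let e := pfx.findIdx (fun p => decide (value ≤ p))
    let target := PySem.List.pyGetD pfx (e : Int) 0 - value
    -- start = next(s for s in range(1, end + 1) if prefix[s] > target) - 1
    let start := (1 + (PySem.List.slice pfx (some 1) (some ((e : Int) + 1))).findIdx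
                    (fun p => decide (target < p))) - 1
    PySem.List.slice low (some (start : Int)) (some (e : Int))

-- ===== PRECONDITION & SPEC =====
-- Pre_ excludes exactly the inputs on which A raises: a utxo without a "value" key (KeyError),
-- target above the sum of the small utxos with no large utxo available (NotEnoughFundsException),
-- and a non-positive target not exceeding that sum, where A's second while loop indexes past the
-- end of `low` (IndexError).
def Pre_select_gradual (unspent : List (List (String × Int))) (value : Int) : Prop :=
  (∀ u ∈ unspent, (List.lookup "value" u).isSome) ∧
  (((unspent.filter (fun u => decide (sgKey u < value))).map sgKey).sum < value →
      ∃ u ∈ unspent, value ≤ sgKey u) ∧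
  (value ≤ ((unspent.filter (fun u => decide (sgKey u < value))).map sgKey).sum → 1 ≤ value)
instance (unspent : List (List (String × Int))) (value : Int) : Decidable (Pre_select_gradual unspent value) := by unfold Pre_select_gradual; infer_instance
def pvWitness_select_gradual : (List (List (String × Int))) × Int :=
  ([[("value", 5)], [("value", 3)], [("value", 20)]], 6)
def Spec_select_gradual (unspent : List (List (String × Int))) (value : Int) (out : List (List (String × Int))) : Prop := out = select_gradual_alt unspent value
instance (unspent : List (List (String × Int))) (value : Int) (out : List (List (String × Int))) : Decidable (Spec_select_gradual unspent value out) := by unfold Spec_select_gradual; infer_instance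

-- ===== CLAIM (what is proved, stated in full; the proofs are below) =====
def Claim_equal_select_gradual : Prop := ∀ (unspent : List (List (String × Int))) (value : Int), Dom_select_gradual unspent value → Pre_select_gradual unspent value → Spec_select_gradual unspent value (select_gradual unspent value)

-- ===== LEMMAS AND PROOFS =====

-- prefix sums of the key values, starting after an accumulated total t
def sgPrefixFrom (t : Int) : List (List (String × Int)) → List Int
  | [] => []
  | u :: rs => (t + sgKey u) :: sgPrefixFrom (t + sgKey u) rs

theorem sg_foldl_prefix (low : List (List (String × Int))) :
    ∀ (init : List Int) (t : Int),
      low.foldl (fun acc u => acc ++ [PySem.List.pyGetD acc (-1) 0 + sgKey u]) (init ++ [t])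
        = init ++ t :: sgPrefixFrom t low := by
  induction low with
  | nil => intro init t; simp [sgPrefixFrom]
  | cons u rs ih =>
      intro init t
      simp only [List.foldl_cons, PySem.List.pyGetD_neg_one_append_singleton]
      have := ih (init ++ [t]) (t + sgKey u)
      simpa [sgPrefixFrom, List.append_assoc] using this

theorem sg_prefix_last (low : List (List (String × Int))) :
    ∀ t : Int, PySem.List.pyGetD (t :: sgPrefixFrom t low) (-1) 0 = t + (low.map sgKey).sum := by
  induction low with
  | nil => intro t; simpa using PySem.List.pyGetD_neg_one_append_singleton [] t 0
  | cons u rs ih =>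
      intro t
      have h1 : (t :: sgPrefixFrom t (u :: rs)) = t :: (t + sgKey u) :: sgPrefixFrom (t + sgKey u) rs := rfl
      have hne : ((t + sgKey u) :: sgPrefixFrom (t + sgKey u) rs) ≠ [] := by simp
      rw [h1, PySem.List.pyGetD_neg_one _ 0 (by simp),
        List.getLast_cons hne, ← PySem.List.pyGetD_neg_one _ 0 hne, ih (t + sgKey u)]
      simp only [List.map_cons, List.sum_cons]
      ring

theorem sg_loop1_eq (value : Int) :
    ∀ (rest : List (List (String × Int))) (t : Int) (e : Nat),
      (∃ p ∈ t :: sgPrefixFrom t rest, value ≤ p) →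
      sgLoop1 value rest t e =
        (e + List.findIdx (fun p => decide (value ≤ p)) (t :: sgPrefixFrom t rest),
         List.getD (t :: sgPrefixFrom t rest)
           (List.findIdx (fun p => decide (value ≤ p)) (t :: sgPrefixFrom t rest)) 0) := by
  intro rest
  induction rest with
  | nil =>
      intro t e h
      obtain ⟨p, hp, hv⟩ := h
      simp [sgPrefixFrom] at hp
      subst hp
      simp [sgLoop1, sgPrefixFrom, List.findIdx_cons, hv]
  | cons u rs ih =>
      intro t e h
      by_cases hvt : value ≤ t
      · simp [sgLoop1, sgPrefixFrom, List.findIdx_cons, hvt, not_lt.mpr hvt]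
      · have hlt : t < value := lt_of_not_ge hvt
        have h' : ∃ p ∈ (t + sgKey u) :: sgPrefixFrom (t + sgKey u) rs, value ≤ p := by
          obtain ⟨p, hp, hv⟩ := h
          rcases (by simpa [sgPrefixFrom] using hp : p = t ∨ p ∈ (t + sgKey u) :: sgPrefixFrom (t + sgKey u) rs) with h1 | h1
          · exact absurd (h1 ▸ hv) hvt
          · exact ⟨p, h1, hv⟩
        have := ih (t + sgKey u) (e + 1) h'
        simp only [sgLoop1, if_pos hlt, this, sgPrefixFrom, List.findIdx_cons,
          decide_eq_false hvt, cond_false, Prod.mk.injEq]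
        constructor
        · omega
        · simp

theorem sg_loop2_eq (value T : Int) :
    ∀ (rest : List (List (String × Int))) (t : Int) (s : Nat),
      (∃ p ∈ sgPrefixFrom t rest, T - value < p) →
      (sgLoop2 value rest (T - t) s).1 =
        s + List.findIdx (fun p => decide (T - value < p)) (sgPrefixFrom t rest) := by
  intro rest
  induction rest with
  | nil => intro t s h; simp [sgPrefixFrom] at h
  | cons u rs ih =>
      intro t s h
      by_cases hc : T - value < t + sgKey u
      · have hnc : ¬ (value + sgKey u ≤ T - t) := by omega
        simp [sgLoop2, sgPrefixFrom, List.findIdx_cons, hnc, hc]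
      · have hcc : value + sgKey u ≤ T - t := by omega
        have h' : ∃ p ∈ sgPrefixFrom (t + sgKey u) rs, T - value < p := by
          obtain ⟨p, hp, hv⟩ := h
          rcases (by simpa [sgPrefixFrom] using hp : p = t + sgKey u ∨ p ∈ sgPrefixFrom (t + sgKey u) rs) with h1 | h1
          · exact absurd (h1 ▸ hv) hc
          · exact ⟨p, h1, hv⟩
        have heq : T - t - sgKey u = T - (t + sgKey u) := by ring
        have := ih (t + sgKey u) (s + 1) h'
        simp only [sgLoop2, if_pos hcc, heq, this, sgPrefixFrom, List.findIdx_cons,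
          decide_eq_false hc, cond_false]
        omega

theorem sg_findIdx_le {p : Int → Bool} :
    ∀ (l : List Int) (i : Nat), i < l.length → p (l.getD i 0) = true → l.findIdx p ≤ i := by
  intro l
  induction l with
  | nil => intro i h; simp at h
  | cons a t ih =>
      intro i hi hp
      cases i with
      | zero => simp_all [List.findIdx_cons]
      | succ j =>
          by_cases ha : p a
          · simp [List.findIdx_cons, ha]
          · have := ih j (by simpa using hi) (by simpa using hp)
            simp [List.findIdx_cons, ha]
            omega

theorem sg_findIdx_take {p : Int → Bool} :
    ∀ (l : List Int) (n : Nat), l.findIdx p < n → (l.take n).findIdx p = l.findIdx p := by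
  intro l
  induction l with
  | nil => intro n _; simp
  | cons a t ih =>
      intro n hn
      cases n with
      | zero => omega
      | succ m =>
          by_cases ha : p a
          · simp [List.findIdx_cons, ha]
          · have hlt : t.findIdx p < m := by
              simp [List.findIdx_cons, ha] at hn; omega
            simp [List.take_succ_cons, List.findIdx_cons, ha, ih m hlt]

-- the low branch: A's two pointer loops land on the same window as B's two table searches
theorem sg_low_branch (low : List (List (String × Int))) (value : Int)
    (hv : 1 ≤ value) (hsum : value ≤ (low.map sgKey).sum) :
    let p1 := sgLoop1 value low 0 0
    let p2 := sgLoop2 value low p1.2 0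
    let pfx := (0 : Int) :: sgPrefixFrom 0 low
    let e := pfx.findIdx (fun p => decide (value ≤ p))
    let target := PySem.List.pyGetD pfx (e : Int) 0 - value
    let start := (1 + (PySem.List.slice pfx (some 1) (some ((e : Int) + 1))).findIdx
                    (fun p => decide (target < p))) - 1
    p1.1 = e ∧ p2.1 = start := by
  intro p1 p2 pfx e target start
  -- the last prefix is the total sum, hence a witness for the first search
  have hlast : PySem.List.pyGetD pfx (-1) 0 = (low.map sgKey).sum := by
    simpa using sg_prefix_last low 0
  have hlastmem : PySem.List.pyGetD pfx (-1) 0 ∈ pfx := by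
    rw [PySem.List.pyGetD_neg_one pfx 0 (by simp [pfx])]
    exact List.getLast_mem _
  have hex1 : ∃ p ∈ pfx, value ≤ p := ⟨_, hlastmem, by rw [hlast]; exact hsum⟩
  have hL1 := sg_loop1_eq value low 0 0 hex1
  have he1 : p1.1 = e := by simp [p1, hL1, e, pfx]
  have hT : p1.2 = pfx.getD e 0 := by simp [p1, hL1, e, pfx]
  -- findIdx found a real index: e < pfx.length, and value ≤ pfx[e]
  have hfound : e < pfx.length := by
    obtain ⟨p, hp, hvp⟩ := hex1
    exact List.findIdx_lt_length_of_exists ⟨p, hp, by simpa using hvp⟩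
  have hpe : value ≤ pfx.getD e 0 := by
    rw [List.getD_eq_getElem pfx 0 hfound]
    have h := List.findIdx_getElem (p := fun p => decide (value ≤ p)) (xs := pfx) (w := hfound)
    simpa using h
  have hTgt : target = pfx.getD e 0 - value := by
    simp [target, PySem.List.pyGetD_natCast, e]
  -- e ≥ 1 since pfx[0] = 0 < value
  have he0 : 1 ≤ e := by
    rcases Nat.eq_zero_or_pos e with h0 | h1
    · exfalso
      have : pfx.getD e 0 = 0 := by simp [h0, pfx]
      omega
    · exact h1
  -- second search: Q := sgPrefixFrom 0 low, element Q[e-1] = pfx[e] satisfies target < ·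
  have hQd : (sgPrefixFrom 0 low).getD (e - 1) 0 = pfx.getD e 0 := by
    have : e = (e - 1) + 1 := by omega
    rw [this]; simp [pfx]
  have hQlen : e - 1 < (sgPrefixFrom 0 low).length := by
    have : pfx.length = (sgPrefixFrom 0 low).length + 1 := by simp [pfx]
    omega
  have hwit : (fun p => decide (target < p)) ((sgPrefixFrom 0 low).getD (e - 1) 0) = true := by
    rw [hQd]; simp only [decide_eq_true_eq, hTgt]; omega
  have hexQ : ∃ p ∈ sgPrefixFrom 0 low, target < p := by
    refine ⟨(sgPrefixFrom 0 low).getD (e - 1) 0, ?_, by simpa using hwit⟩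
    rw [List.getD_eq_getElem _ _ hQlen]; exact List.getElem_mem _
  have hidx_lt : (sgPrefixFrom 0 low).findIdx (fun p => decide (target < p)) ≤ e - 1 :=
    sg_findIdx_le _ _ hQlen hwit
  have hL2 := sg_loop2_eq value (pfx.getD e 0) low 0 0 (by rw [← hTgt]; exact hexQ)
  have htotal : p1.2 - 0 = p1.2 := by ring
  have hp2 : p2.1 = (sgPrefixFrom 0 low).findIdx (fun p => decide (pfx.getD e 0 - value < p)) := by
    have h0 : p2.1 = (sgLoop2 value low (p1.2 - 0) 0).1 := by
      rw [htotal]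
    rw [h0, hT, hL2]; omega
  -- B's slice pfx[1:e+1] is (take e) of Q
  have hslice : PySem.List.slice pfx (some 1) (some ((e : Int) + 1))
      = (sgPrefixFrom 0 low).take e := by
    have h1 : ((1 : Nat) : Int) = (1 : Int) := by norm_num
    have := PySem.List.slice_natCast pfx 1 (e + 1)
    simp only [Nat.cast_add, Nat.cast_one] at this
    rw [show ((e : Int) + 1) = (((e + 1 : Nat) : Int)) by push_cast; ring, ← h1, PySem.List.slice_natCast]
    simp [pfx]
  have hstart : start = (sgPrefixFrom 0 low).findIdx (fun p => decide (target < p)) := by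
    have htake := sg_findIdx_take (p := fun p => decide (target < p)) (sgPrefixFrom 0 low) e (by omega)
    simp [start, hslice, htake]
  refine ⟨he1, ?_⟩
  rw [hp2, hstart, hTgt]

theorem sg_pre_sum_eq (unspent : List (List (String × Int))) (value : Int) :
    ((PySem.List.sorted (unspent.filter (fun u => decide (sgKey u < value))) sgKey).map sgKey).sum
      = ((unspent.filter (fun u => decide (sgKey u < value))).map sgKey).sum :=
  ((PySem.List.sorted_perm _ sgKey false).map sgKey).sum_eq

-- ===== VERDICT (by name: the statement is the Claim_ definition above) =====
theorem select_gradual_spec : Claim_equal_select_gradual := by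
  intro unspent value _ hpre
  obtain ⟨-, hhigh, hlow⟩ := hpre
  unfold Spec_select_gradual select_gradual select_gradual_alt
  simp only []
  set high := PySem.List.sorted (unspent.filter (fun u => decide (value ≤ sgKey u))) sgKey with hh
  set low := PySem.List.sorted (unspent.filter (fun u => decide (sgKey u < value))) sgKey with hl
  have hpfx : low.foldl (fun acc u => acc ++ [PySem.List.pyGetD acc (-1) 0 + sgKey u]) [(0 : Int)]
      = (0 : Int) :: sgPrefixFrom 0 low := by
    simpa using sg_foldl_prefix low [] 0
  have hS : (low.map sgKey).foldl (fun x y => x + y) 0 = (low.map sgKey).sum := by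
    simpa using PySem.List.foldl_add (g := fun x : Int => x) (low.map sgKey) 0
  have hlastS : PySem.List.pyGetD ((0 : Int) :: sgPrefixFrom 0 low) (-1) 0 = (low.map sgKey).sum := by
    simpa using sg_prefix_last low 0
  rw [hpfx, hS, hlastS]
  by_cases hcase : (low.map sgKey).sum < value
  · simp [hcase]
  · have hsum : value ≤ (low.map sgKey).sum := not_lt.1 hcase
    have hv : 1 ≤ value := hlow (by rw [← sg_pre_sum_eq unspent value, ← hl]; exact hsum)
    have := sg_low_branch low value hv hsum
    simp only [] at this
    obtain ⟨h1, h2⟩ := this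
    simp [hcase, h1, h2]
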